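-- pv_equiv track=rewrite | github.com/special-linear/eqpfit | eqpfit/binom.py | binom_int
-- ===== SOURCE A (Python) =====
-- def binom_int(n: int, k: int) -> int:
--     """Compute the integer binomial coefficient C(n, k) for integer n and k >= 0.
--
--     Supports negative ``n`` using the generalized binomial identity::
--
--         C(n, k) = (-1)^k * C(k - n - 1, k)
--     """
--
--     if k < 0:
--         raise ValueError("k must be non-negative")
--     if k == 0:
--         return 1
--     if n < 0:
--         return ((-1) ** k) * binom_int(k - n - 1, k)
--     if k > n:
--         return 0
--     result = 1
--     for i in range(1, k + 1):
--         result = result * (n - i + 1) // i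
--     return result
-- ===== SOURCE B (Python) =====
-- def binom_int(n: int, k: int) -> int:
--     """C(n, k) for integer n and k >= 0: normalize negative n up front, then
--     compute a falling-factorial numerator and a factorial denominator in two
--     separate product loops and divide once."""
--     if k < 0:
--         raise ValueError("k must be non-negative")
--     sign = 1
--     if n < 0:
--         sign = (-1) ** k
--         n = k - n - 1
--     if k > n:
--         return 0
--     num = 1
--     for i in range(n - k + 1, n + 1):
--         num *= i
--     den = 1
--     for i in range(2, k + 1):
--         den *= i
--     return sign * (num // den)
-- ===== Notes on version B (the rewrite author's own statement) =====
-- stated objective: alternative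
-- what changed: B normalizes negative n up front (sign=(-1)**k, n=k-n-1) instead of recursing, and computes the coefficient as a falling-factorial-over-factorial ratio built from two separate product loops with a single final division, instead of A's fused running-product loop with an interleaved floor division at every step.
import Mathlib
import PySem

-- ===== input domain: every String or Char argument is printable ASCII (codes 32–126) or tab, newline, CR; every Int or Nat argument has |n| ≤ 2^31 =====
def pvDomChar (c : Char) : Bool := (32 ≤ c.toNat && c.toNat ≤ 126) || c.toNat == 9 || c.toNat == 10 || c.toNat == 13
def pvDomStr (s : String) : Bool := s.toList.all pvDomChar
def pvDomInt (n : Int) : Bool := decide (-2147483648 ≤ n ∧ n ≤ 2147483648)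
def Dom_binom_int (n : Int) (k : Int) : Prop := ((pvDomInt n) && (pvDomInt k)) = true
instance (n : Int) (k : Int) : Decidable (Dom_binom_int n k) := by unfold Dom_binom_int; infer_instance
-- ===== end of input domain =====

-- B replaces A's (-1)^k recursion by an up-front sign/argument normalization and A's fused
-- running-product loop by a factorial ratio n!//(k!*(n-k)!) built from separate product loops.

-- ===== PORT A =====
def binom_int (n : Int) (k : Int) : Int :=
  if k < 0 then 0   -- Python raises ValueError here; excluded by Pre_binom_int
  else if k = 0 then 1
  else if n < 0 then ((-1) ^ k.toNat) * binom_int (k - n - 1) k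
  else if k > n then 0
  else (PySem.List.pyRange 1 (k + 1) 1).foldl
         (fun result i => PySem.Int.floordiv (result * (n - i + 1)) i) 1
termination_by (if n < 0 then 1 else 0 : Nat)
decreasing_by
  rename_i h1 _ h3
  have : ¬ (k - n - 1 < 0) := by omega
  simp [this, h3]

-- ===== PORT B =====
def binom_int_alt (n : Int) (k : Int) : Int :=
  if k < 0 then 0   -- Python raises ValueError here; excluded by Pre_binom_int
  else
    let sign : Int := if n < 0 then (-1) ^ k.toNat else 1
    let n' : Int := if n < 0 then k - n - 1 else n
    if k > n' then 0
    else
      let num := (PySem.List.pyRange (n' - k + 1) (n' + 1) 1).foldl (fun p i => p * i) 1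
      let den := (PySem.List.pyRange 2 (k + 1) 1).foldl (fun p i => p * i) 1
      sign * PySem.Int.floordiv num den

-- ===== PRECONDITION & SPEC =====
-- Python A raises ValueError exactly when k < 0; those inputs are excluded.
def Pre_binom_int (n : Int) (k : Int) : Prop := 0 ≤ k
instance (n : Int) (k : Int) : Decidable (Pre_binom_int n k) := by unfold Pre_binom_int; infer_instance
def pvWitness_binom_int : Int × Int := (7, 3)

def Spec_binom_int (n : Int) (k : Int) (out : Int) : Prop := out = binom_int_alt n k
instance (n : Int) (k : Int) (out : Int) : Decidable (Spec_binom_int n k out) := by unfold Spec_binom_int; infer_instance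

-- ===== CLAIM (what is proved, stated in full; the proofs are below) =====
def Claim_equal_binom_int : Prop := ∀ (n : Int) (k : Int), Dom_binom_int n k → Pre_binom_int n k → Spec_binom_int n k (binom_int n k)

-- ===== LEMMAS AND PROOFS =====

-- A's loop computes the binomial coefficient exactly (each division is exact).
theorem pvLoopA_eq_choose (N K : Nat) (h : K ≤ N) :
    (PySem.List.pyRange 1 ((K : Int) + 1) 1).foldl
      (fun result i => PySem.Int.floordiv (result * ((N : Int) - i + 1)) i) 1
      = (N.choose K : Int) := by
  induction K with
  | zero => simp [PySem.List.pyRange_one_eq_nil]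
  | succ K ih =>
    have hK : K ≤ N := Nat.le_of_succ_le h
    rw [show (((K + 1 : Nat) : Int) + 1) = (((K : Int) + 1) + 1) by push_cast; ring,
        PySem.List.pyRange_one_succ_right (by omega : (1:Int) ≤ (K : Int) + 1)]
    rw [List.foldl_append, ih hK]
    simp only [List.foldl]
    have hsub : ((N : Int) - ((K : Int) + 1) + 1) = ((N - K : Nat) : Int) := by
      have : (K : Int) ≤ (N : Int) := by exact_mod_cast hK
      omega
    rw [hsub]
    have hid : N.choose K * (N - K) = N.choose (K + 1) * (K + 1) :=
      (Nat.choose_succ_right_eq N K).symm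
    have hcast : ((N.choose K : Int)) * ((N - K : Nat) : Int)
        = ((N.choose (K + 1) * (K + 1) : Nat) : Int) := by
      push_cast [← hid]; ring
    rw [hcast, show ((K : Int) + 1) = ((K + 1 : Nat) : Int) by push_cast; ring,
        PySem.Int.floordiv_natCast, Nat.mul_div_cancel _ (Nat.succ_pos K)]

-- B's denominator loop is the factorial.
theorem pvDen_eq (M : Nat) :
    (PySem.List.pyRange 2 ((M : Int) + 1) 1).foldl (fun p i => p * i) 1 = (M.factorial : Int) := by
  induction M with
  | zero => simp [PySem.List.pyRange_one_eq_nil]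
  | succ M ih =>
    cases M with
    | zero => simp [PySem.List.pyRange_one_eq_nil]
    | succ M' =>
      rw [show (((M' + 1 + 1 : Nat) : Int) + 1)
            = ((((M' + 1 : Nat) : Int) + 1) + 1) by push_cast; ring]
      rw [PySem.List.pyRange_one_succ_right (by push_cast; omega : (2:Int) ≤ ((M' + 1 : Nat) : Int) + 1)]
      rw [List.foldl_append, ih]
      simp only [List.foldl]
      rw [show M' + 1 + 1 = (M' + 1) + 1 from rfl, Nat.factorial_succ (M' + 1)]
      push_cast
      ring

-- B's numerator loop is the falling factorial n * (n-1) * … * (n-k+1).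
theorem pvNum_eq (N K : Nat) (h : K ≤ N) :
    (PySem.List.pyRange ((N : Int) - (K : Int) + 1) ((N : Int) + 1) 1).foldl (fun p i => p * i) 1
      = (N.descFactorial K : Int) := by
  induction K with
  | zero =>
    rw [PySem.List.pyRange_one_eq_nil (by omega)]
    simp
  | succ K ih =>
    have hK : K ≤ N := Nat.le_of_succ_le h
    have hKN : (K : Int) ≤ (N : Int) := by exact_mod_cast hK
    have hKN1 : ((K + 1 : Nat) : Int) ≤ (N : Int) := by exact_mod_cast h
    rw [show ((N : Int) - ((K + 1 : Nat) : Int) + 1) = ((N : Int) - (K : Int)) by push_cast; ring]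
    rw [PySem.List.pyRange_one_cons (by omega)]
    rw [show ((N : Int) - (K : Int) + 1) = ((N : Int) - (K : Int) + 1) from rfl]
    rw [List.foldl_cons]
    have hshift : ∀ (l : List Int) (c : Int),
        l.foldl (fun p i => p * i) c = c * l.foldl (fun p i => p * i) 1 := by
      intro l
      induction l with
      | nil => intro c; simp
      | cons x xs ihl =>
        intro c
        rw [List.foldl_cons, List.foldl_cons, ihl (c * x), ihl (1 * x)]
        ring
    rw [hshift, ih hK]
    have hsub : ((N : Int) - (K : Int)) = ((N - K : Nat) : Int) := by omega
    rw [Nat.descFactorial_succ]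
    rw [hsub]
    push_cast
    ring

-- B's ratio of the two loop products is the binomial coefficient.
theorem pvRatioB_eq_choose (N K : Nat) (h : K ≤ N) :
    PySem.Int.floordiv
      ((PySem.List.pyRange ((N : Int) - (K : Int) + 1) ((N : Int) + 1) 1).foldl (fun p i => p * i) 1)
      ((PySem.List.pyRange 2 ((K : Int) + 1) 1).foldl (fun p i => p * i) 1)
      = (N.choose K : Int) := by
  rw [pvNum_eq N K h, pvDen_eq K, PySem.Int.floordiv_natCast,
      ← Nat.choose_eq_descFactorial_div_factorial]

-- A on nonnegative n with 0 < k ≤ n (the loop branch).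
theorem pvA_pos (N K : Nat) (hpos : 0 < K) (h : K ≤ N) :
    binom_int (N : Int) (K : Int) = (N.choose K : Int) := by
  rw [binom_int]
  have h1 : ¬ ((K : Int) < 0) := not_lt.mpr (Int.natCast_nonneg K)
  have h2 : ¬ ((K : Int) = 0) := by exact_mod_cast hpos.ne'
  have h3 : ¬ ((N : Int) < 0) := not_lt.mpr (Int.natCast_nonneg N)
  have h4 : ¬ ((K : Int) > (N : Int)) := by exact_mod_cast Nat.not_lt.mpr h
  rw [if_neg h1, if_neg h2, if_neg h3, if_neg h4]
  exact pvLoopA_eq_choose N K h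

-- B for 0 ≤ k with k ≤ normalized n, unfolded to sign * choose.
theorem pvB_eval (n : Int) (K : Nat)
    (h : (K : Int) ≤ (if n < 0 then (K : Int) - n - 1 else n)) :
    binom_int_alt n (K : Int)
      = (if n < 0 then (-1 : Int) ^ K else 1)
        * ((if n < 0 then (K : Int) - n - 1 else n).toNat.choose K : Int) := by
  unfold binom_int_alt
  rw [if_neg (not_lt.mpr (Int.natCast_nonneg K))]
  simp only [Int.toNat_natCast]
  rw [if_neg (not_lt.mpr h)]
  set n' : Int := if n < 0 then (K : Int) - n - 1 else n with hn'
  have hn'0 : 0 ≤ n' := le_trans (Int.natCast_nonneg K) h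
  have hKle : K ≤ n'.toNat := by omega
  have hc : n' = ((n'.toNat : Nat) : Int) := (Int.toNat_of_nonneg hn'0).symm
  rw [show n' - (K : Int) + 1 = ((n'.toNat : Nat) : Int) - (K : Int) + 1 by omega,
      show n' + 1 = ((n'.toNat : Nat) : Int) + 1 by omega]
  rw [pvRatioB_eq_choose n'.toNat K hKle]

-- ===== VERDICT (by name: the statement is the Claim_ definition above) =====
theorem binom_int_spec : Claim_equal_binom_int := by
  intro n k _hdom hk
  have hk0 : 0 ≤ k := hk
  unfold Spec_binom_int
  obtain ⟨K, rfl⟩ : ∃ K : Nat, k = (K : Int) := ⟨k.toNat, by omega⟩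
  have h1 : ¬ ((K : Int) < 0) := not_lt.mpr (Int.natCast_nonneg K)
  by_cases hn : n < 0
  · -- A recurses: (-1)^k * binom_int (k - n - 1) k  with k ≤ k - n - 1
    have hle : (K : Int) ≤ (K : Int) - n - 1 := by omega
    rw [pvB_eval n K (by simp [hn, hle])]
    rw [binom_int, if_neg h1]
    by_cases hK0 : K = 0
    · subst hK0; simp [hn]
    · have hKpos : 0 < K := Nat.pos_of_ne_zero hK0
      have h2 : ¬ ((K : Int) = 0) := by exact_mod_cast hK0
      rw [if_neg h2, if_pos hn]
      set m : Int := (K : Int) - n - 1 with hm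
      have hm0 : 0 ≤ m := by omega
      have hmc : m = ((m.toNat : Nat) : Int) := (Int.toNat_of_nonneg hm0).symm
      have hKm : K ≤ m.toNat := by omega
      rw [hmc, pvA_pos m.toNat K hKpos hKm]
      simp [hn, max_eq_left hm0]
  · -- n ≥ 0
    by_cases hgt : (K : Int) > n
    · -- k > n : both sides are 0 (k cannot be 0 here)
      have h2 : ¬ ((K : Int) = 0) := by omega
      rw [binom_int, if_neg h1, if_neg h2, if_neg hn, if_pos hgt]
      simp [binom_int_alt, h1, hn, hgt]
    · have hle : (K : Int) ≤ n := not_lt.mp hgt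
      rw [pvB_eval n K (by simp [hn, hle])]
      by_cases hK0 : K = 0
      · subst hK0
        rw [binom_int]
        simp [hn]
      · have hKpos : 0 < K := Nat.pos_of_ne_zero hK0
        have hnc : n = ((n.toNat : Nat) : Int) := (Int.toNat_of_nonneg (not_lt.mp hn)).symm
        have hKn : K ≤ n.toNat := by omega
        rw [hnc, pvA_pos n.toNat K hKpos hKn]
        simp [hn, max_eq_left (not_lt.mp hn)]
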